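-- pv_equiv track=rewrite | github.com/JF-GIAMMARI/Atelier_Programmation | Python/ATELIER 3/Correction_Global_Atelier3.py | separer
-- ===== SOURCE A (Python) =====
-- def separer(number_list: list) -> list:
--     """ Sort by sign function without ascending or descending sorting
--     Keyword argument:
--     number_list -- List of number to sum
--     return the sorted list
--     """
--     LSEP = []
--     count_negative = 0
--     for e in number_list:
--         if e < 0:
--             LSEP.insert(0, e)
--             count_negative += 1
--         elif e > 0:
--             LSEP.append(e)
--         else:
--             LSEP.insert(count_negative, e)
--
--     return LSEP
-- ===== SOURCE B (Python) =====
-- def separer(number_list: list) -> list: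
--     negatives = []
--     zeros = []
--     positives = []
--     for e in number_list:
--         if e < 0:
--             negatives.append(e)
--         elif e > 0:
--             positives.append(e)
--         else:
--             zeros.append(e)
--     negatives.reverse()
--     return negatives + zeros + positives
-- ===== Notes on version B (the rewrite author's own statement) =====
-- stated objective: faster
-- what changed: A builds one list with repeated insert(0,...)/insert(count,...) (each a linear shift, O(n^2) total); B does a single pass into three append-only lists, reverses the negatives once and concatenates.
import Mathlib
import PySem

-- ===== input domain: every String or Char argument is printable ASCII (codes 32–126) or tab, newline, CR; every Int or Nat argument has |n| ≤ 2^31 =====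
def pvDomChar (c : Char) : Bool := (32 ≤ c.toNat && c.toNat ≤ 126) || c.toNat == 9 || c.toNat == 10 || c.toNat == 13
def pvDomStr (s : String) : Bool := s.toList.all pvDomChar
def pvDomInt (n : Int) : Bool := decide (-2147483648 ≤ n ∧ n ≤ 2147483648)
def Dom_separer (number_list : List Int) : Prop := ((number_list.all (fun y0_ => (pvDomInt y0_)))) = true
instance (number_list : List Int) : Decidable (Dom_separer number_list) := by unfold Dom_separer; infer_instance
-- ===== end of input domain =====

-- B replaces A's repeated linear-shift inserts with one pass into three lists; faster (asymptotic).

-- ===== PORT A =====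
def separer (number_list : List Int) : List Int :=
  (number_list.foldl
    (fun (st : List Int × Int) e =>
      if e < 0 then (PySem.List.insert st.1 0 e, st.2 + 1)
      else if e > 0 then (st.1 ++ [e], st.2)
      else (PySem.List.insert st.1 st.2 e, st.2)) ([], 0)).1

-- ===== PORT B =====
def separer_alt (number_list : List Int) : List Int :=
  let t := number_list.foldl
    (fun (st : List Int × List Int × List Int) e =>
      if e < 0 then (st.1 ++ [e], st.2.1, st.2.2)
      else if e > 0 then (st.1, st.2.1, st.2.2 ++ [e])
      else (st.1, st.2.1 ++ [e], st.2.2)) ([], [], [])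
  t.1.reverse ++ t.2.1 ++ t.2.2

-- ===== PRECONDITION & SPEC =====
def Spec_separer (number_list : List Int) (out : List Int) : Prop := out = separer_alt number_list
instance (number_list : List Int) (out : List Int) : Decidable (Spec_separer number_list out) := by unfold Spec_separer; infer_instance

-- ===== CLAIM =====
def Claim_equal_separer : Prop := ∀ (number_list : List Int), Dom_separer number_list → Spec_separer number_list (separer number_list)

-- ===== LEMMAS AND PROOFS =====
lemma zeros_cons_eq_append (z : List Int) (hz : ∀ x ∈ z, x = 0) :
    (0 : Int) :: z = z ++ [0] := by
  induction z with
  | nil => rfl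
  | cons a t ih =>
      have ha : a = 0 := hz a (by simp)
      have ht : ∀ x ∈ t, x = (0 : Int) := fun x hx => hz x (by simp [hx])
      simpa [ha] using ih ht

lemma separer_inv (l n z p : List Int) (hz : ∀ x ∈ z, x = (0 : Int)) :
    (l.foldl
      (fun (st : List Int × Int) e =>
        if e < 0 then (PySem.List.insert st.1 0 e, st.2 + 1)
        else if e > 0 then (st.1 ++ [e], st.2)
        else (PySem.List.insert st.1 st.2 e, st.2)) (n.reverse ++ (z ++ p), (n.length : Int))).1
    = (let t := l.foldl
        (fun (st : List Int × List Int × List Int) e =>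
          if e < 0 then (st.1 ++ [e], st.2.1, st.2.2)
          else if e > 0 then (st.1, st.2.1, st.2.2 ++ [e])
          else (st.1, st.2.1 ++ [e], st.2.2)) (n, z, p)
      t.1.reverse ++ (t.2.1 ++ t.2.2)) := by
  induction l generalizing n z p with
  | nil => simp
  | cons e tl ih =>
      by_cases h1 : e < 0
      · simpa [h1, PySem.List.insert_zero] using ih (n ++ [e]) z p hz
      · by_cases h2 : e > 0
        · simpa [h1, h2] using ih n z (p ++ [e]) hz
        · have he : e = 0 := by omega
          subst he
          have hA : PySem.List.insert (n.reverse ++ (z ++ p)) (n.length : Int) 0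
              = n.reverse ++ (z ++ (0 :: p)) := by
            rw [PySem.List.insert_natCast _ _ _ (by simp)]
            rw [List.take_append_of_le_length (by simp),
                List.drop_append_of_le_length (by simp)]
            rw [show n.length = n.reverse.length by simp, List.take_length, List.drop_length]
            have hzz : (0 : Int) :: (z ++ p) = z ++ (0 :: p) := by
              calc (0 : Int) :: (z ++ p) = ((0 : Int) :: z) ++ p := by simp
                _ = (z ++ [0]) ++ p := by rw [zeros_cons_eq_append z hz]
                _ = z ++ (0 :: p) := by simp
            simpa using hzz
          have hz' : ∀ x ∈ z ++ [(0 : Int)], x = (0 : Int) := by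
            intro x hx
            rcases List.mem_append.mp hx with h | h
            · exact hz x h
            · simpa using h
          simpa [h1, h2, hA] using ih n (z ++ [0]) p hz'

-- ===== VERDICT =====
theorem separer_spec : Claim_equal_separer := by
  intro l _
  unfold Spec_separer separer separer_alt
  simpa using separer_inv l [] [] [] (by simp)
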